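-- pv_equiv track=rewrite | github.com/khj021101/Algorithm_Baekjoon | Tutorial/6-06-2941.py | word_iterator
-- ===== SOURCE A (Python) =====
-- def word_iterator(word, length):
--     if len(word) == 0:
--         return length
--     if len(word) == 1:
--         return word_iterator(word[1:], length + 1)
--     elif len(word) >= 2:
--         if word[0] == 'c':
--             if word[1] == '=':
--                 return word_iterator(word[2:], length + 1)
--             elif word[1] == '-':
--                 return word_iterator(word[2:], length + 1)
--             else:
--                 return word_iterator(word[1:], length + 1)
--         elif word[0] == 'd':
--             if len(word) >= 3:
--                 if word[1] == 'z' and word[2] == '=':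
--                     return word_iterator(word[3:], length + 1)
--             if word[1] == '-':
--                 return word_iterator(word[2:], length + 1)
--             else:
--                 return word_iterator(word[1:], length + 1)
--         elif word[0] == 'l':
--             if word[1] == 'j':
--                 return word_iterator(word[2:], length + 1)
--             else:
--                 return word_iterator(word[1:], length + 1)
--         elif word[0] == 'n':
--             if word[1] == 'j':
--                 return word_iterator(word[2:], length + 1)
--             else:
--                 return word_iterator(word[1:], length + 1)
--         elif word[0] == 's':
--             if word[1] == '=':
--                 return word_iterator(word[2:], length + 1)
--             else:
--                 return word_iterator(word[1:], length + 1)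
--         elif word[0] == 'z':
--             if word[1] == '=':
--                 return word_iterator(word[2:], length + 1)
--             else:
--                 return word_iterator(word[1:], length + 1)
--         else:
--             return word_iterator(word[1:], length + 1)
-- ===== SOURCE B (Python) =====
-- _TOKENS = ("dz=", "c=", "c-", "d-", "lj", "nj", "s=", "z=")
--
-- def word_iterator(word, length):
--     count = length
--     i = 0
--     n = len(word)
--     while i < n:
--         for t in _TOKENS:
--             if word.startswith(t, i):
--                 i += len(t)
--                 break
--         else:
--             i += 1
--         count += 1
--     return count
-- ===== Notes on version B (the rewrite author's own statement) =====
-- stated objective: faster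
-- what changed: replaced the O(n^2) recursion-with-slicing and hand-written branch cascade by a single iterative scan with an index pointer over a table of multigraph tokens
import Mathlib
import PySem

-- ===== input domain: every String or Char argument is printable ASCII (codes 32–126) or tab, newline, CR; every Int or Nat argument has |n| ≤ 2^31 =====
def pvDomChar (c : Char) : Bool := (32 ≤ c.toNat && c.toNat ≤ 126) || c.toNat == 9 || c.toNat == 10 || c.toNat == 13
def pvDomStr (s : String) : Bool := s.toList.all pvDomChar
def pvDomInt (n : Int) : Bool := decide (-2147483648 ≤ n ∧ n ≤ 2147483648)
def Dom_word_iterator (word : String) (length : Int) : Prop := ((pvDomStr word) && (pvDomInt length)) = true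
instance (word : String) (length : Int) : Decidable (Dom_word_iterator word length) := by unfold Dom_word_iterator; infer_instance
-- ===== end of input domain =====

-- B replaces A's O(n^2) slice-and-recurse branch cascade by a single linear scan over a table of
-- Croatian multigraph tokens; the proof shows both count identically on every string.



-- ===== PORT A =====
-- A recurses on string slices; ported as structural recursion on the char list (slice word[k:] = drop k).
def pvGoA : List Char → Int → Int
  | [], length => length
  | [_], length => pvGoA [] (length + 1)
  | c0 :: c1 :: rest, length =>
    if c0 = 'c' then
      if c1 = '=' then pvGoA rest (length + 1)
      else if c1 = '-' then pvGoA rest (length + 1)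
      else pvGoA (c1 :: rest) (length + 1)
    else if c0 = 'd' then
      match rest with
      | c2 :: rest2 =>
        if c1 = 'z' ∧ c2 = '=' then pvGoA rest2 (length + 1)
        else if c1 = '-' then pvGoA (c2 :: rest2) (length + 1)
        else pvGoA (c1 :: c2 :: rest2) (length + 1)
      | [] =>
        if c1 = '-' then pvGoA [] (length + 1)
        else pvGoA [c1] (length + 1)
    else if c0 = 'l' then
      if c1 = 'j' then pvGoA rest (length + 1) else pvGoA (c1 :: rest) (length + 1)
    else if c0 = 'n' then
      if c1 = 'j' then pvGoA rest (length + 1) else pvGoA (c1 :: rest) (length + 1)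
    else if c0 = 's' then
      if c1 = '=' then pvGoA rest (length + 1) else pvGoA (c1 :: rest) (length + 1)
    else if c0 = 'z' then
      if c1 = '=' then pvGoA rest (length + 1) else pvGoA (c1 :: rest) (length + 1)
    else pvGoA (c1 :: rest) (length + 1)

def word_iterator (word : String) (length : Int) : Int := pvGoA word.toList length

-- ===== PORT B =====
-- B: one linear scan with an index pointer over a table of multigraph tokens (here: scan over the
-- remaining suffix, which is the index pointer of Source B).
def pvTokens : List (List Char) :=
  [['d','z','='], ['c','='], ['c','-'], ['d','-'], ['l','j'], ['n','j'], ['s','='], ['z','=']]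

def pvScanB : List Char → Int → Int
  | [], count => count
  | c :: rest, count =>
    match h : pvTokens.find? (fun t => t.isPrefixOf (c :: rest)) with
    | some t => pvScanB ((c :: rest).drop t.length) (count + 1)
    | none => pvScanB rest (count + 1)
termination_by cs _ => cs.length
decreasing_by
  · have ht := List.mem_of_find?_eq_some h
    have hp := List.find?_some h
    simp only [pvTokens, List.mem_cons, List.not_mem_nil, or_false] at ht
    rcases ht with rfl|rfl|rfl|rfl|rfl|rfl|rfl|rfl <;> simp
  · simp

def word_iterator_alt (word : String) (length : Int) : Int := pvScanB word.toList length

-- ===== PRECONDITION & SPEC =====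
def Spec_word_iterator (word : String) (length : Int) (out : Int) : Prop := out = word_iterator_alt word length
instance (word : String) (length : Int) (out : Int) : Decidable (Spec_word_iterator word length out) := by unfold Spec_word_iterator; infer_instance

-- ===== CLAIM (what is proved, stated in full; the proofs are below) =====
def Claim_equal_word_iterator : Prop := ∀ (word : String) (length : Int), Dom_word_iterator word length → Spec_word_iterator word length (word_iterator word length)

-- ===== LEMMAS AND PROOFS =====

-- ===== VERDICT (by name: the statement is the Claim_ definition above) =====
-- `b == a` is false when the chars differ (stated with the inequality the split_ifs hypotheses give)
theorem pvBeqF {a b : Char} (h : ¬ b = a) : (a == b) = false :=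
  beq_eq_false_iff_ne.mpr (Ne.symm h)

theorem pvScanB_single (c : Char) (n : Int) : pvScanB [c] n = n + 1 := by
  rw [pvScanB]
  split
  · next t h => simp [pvTokens, List.isPrefixOf] at h
  · next h => rw [pvScanB]

theorem pvScanB_tok2 (c0 c1 : Char) (rest : List Char) (n : Int)
    (htok : (c0, c1) = ('c', '=') ∨ (c0, c1) = ('c', '-') ∨ (c0, c1) = ('d', '-') ∨
            (c0, c1) = ('l', 'j') ∨ (c0, c1) = ('n', 'j') ∨ (c0, c1) = ('s', '=') ∨
            (c0, c1) = ('z', '=')) :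
    pvScanB (c0 :: c1 :: rest) n = pvScanB rest (n + 1) := by
  rcases htok with h|h|h|h|h|h|h <;> (injection h with h1 h2; subst h1; subst h2) <;>
    (rw [pvScanB]; split
     · next t h =>
         simp [pvTokens, List.find?, List.isPrefixOf] at h
         subst h; simp
     · next h => simp [pvTokens, List.find?, List.isPrefixOf] at h)

theorem pvScanB_tok3 (rest : List Char) (n : Int) :
    pvScanB ('d' :: 'z' :: '=' :: rest) n = pvScanB rest (n + 1) := by
  rw [pvScanB]
  split
  · next t h =>
      simp [pvTokens, List.isPrefixOf] at h
      subst h; simp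
  · next h => simp [pvTokens, List.isPrefixOf] at h

theorem pvScanB_c_other (c1 : Char) (rest : List Char) (n : Int)
    (h1 : ¬ c1 = '=') (h2 : ¬ c1 = '-') :
    pvScanB ('c' :: c1 :: rest) n = pvScanB (c1 :: rest) (n + 1) := by
  rw [pvScanB]
  split
  · next t h => simp [pvTokens, List.find?, List.isPrefixOf, pvBeqF h1, pvBeqF h2] at h
  · next h => rfl

theorem pvScanB_d_other (c1 : Char) (rest : List Char) (n : Int)
    (h1 : ¬ c1 = '-') (hz : ¬ c1 = 'z') :
    pvScanB ('d' :: c1 :: rest) n = pvScanB (c1 :: rest) (n + 1) := by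
  rw [pvScanB]
  split
  · next t h => simp [pvTokens, List.find?, List.isPrefixOf, pvBeqF h1, pvBeqF hz] at h
  · next h => rfl

theorem pvScanB_dz_nil (n : Int) : pvScanB ['d', 'z'] n = pvScanB ['z'] (n + 1) := by
  rw [pvScanB]
  split
  · next t h => simp [pvTokens, List.isPrefixOf] at h
  · next h => rfl

theorem pvScanB_dz_no (c2 : Char) (rest2 : List Char) (n : Int) (hc2 : ¬ c2 = '=') :
    pvScanB ('d' :: 'z' :: c2 :: rest2) n = pvScanB ('z' :: c2 :: rest2) (n + 1) := by
  rw [pvScanB]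
  split
  · next t h => simp [pvTokens, List.find?, List.isPrefixOf, pvBeqF hc2] at h
  · next h => rfl

theorem pvScanB_l_other (c1 : Char) (rest : List Char) (n : Int) (h1 : ¬ c1 = 'j') :
    pvScanB ('l' :: c1 :: rest) n = pvScanB (c1 :: rest) (n + 1) := by
  rw [pvScanB]
  split
  · next t h => simp [pvTokens, List.find?, List.isPrefixOf, pvBeqF h1] at h
  · next h => rfl

theorem pvScanB_n_other (c1 : Char) (rest : List Char) (n : Int) (h1 : ¬ c1 = 'j') :
    pvScanB ('n' :: c1 :: rest) n = pvScanB (c1 :: rest) (n + 1) := by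
  rw [pvScanB]
  split
  · next t h => simp [pvTokens, List.find?, List.isPrefixOf, pvBeqF h1] at h
  · next h => rfl

theorem pvScanB_s_other (c1 : Char) (rest : List Char) (n : Int) (h1 : ¬ c1 = '=') :
    pvScanB ('s' :: c1 :: rest) n = pvScanB (c1 :: rest) (n + 1) := by
  rw [pvScanB]
  split
  · next t h => simp [pvTokens, List.find?, List.isPrefixOf, pvBeqF h1] at h
  · next h => rfl

theorem pvScanB_z_other (c1 : Char) (rest : List Char) (n : Int) (h1 : ¬ c1 = '=') :
    pvScanB ('z' :: c1 :: rest) n = pvScanB (c1 :: rest) (n + 1) := by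
  rw [pvScanB]
  split
  · next t h => simp [pvTokens, List.find?, List.isPrefixOf, pvBeqF h1] at h
  · next h => rfl

theorem pvScanB_other (c0 c1 : Char) (rest : List Char) (n : Int)
    (hc : ¬c0 = 'c') (hd : ¬c0 = 'd') (hl : ¬c0 = 'l') (hn : ¬c0 = 'n')
    (hs : ¬c0 = 's') (hz : ¬c0 = 'z') :
    pvScanB (c0 :: c1 :: rest) n = pvScanB (c1 :: rest) (n + 1) := by
  rw [pvScanB]
  split
  · next t h =>
      simp [pvTokens, List.find?, List.isPrefixOf, pvBeqF hc, pvBeqF hd, pvBeqF hl,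
        pvBeqF hn, pvBeqF hs, pvBeqF hz] at h
  · next h => rfl

theorem pv_go_eq : ∀ (k : Nat) (cs : List Char) (n : Int), cs.length ≤ k → pvGoA cs n = pvScanB cs n := by
  intro k
  induction k with
  | zero =>
    intro cs n h
    match cs with
    | [] => rw [pvGoA, pvScanB]
    | _ :: _ => simp at h
  | succ k ih =>
    intro cs n h
    match cs with
    | [] => rw [pvGoA, pvScanB]
    | [c] => rw [pvGoA, pvGoA, pvScanB_single]
    | c0 :: c1 :: rest =>
      have hlen : rest.length + 2 ≤ k + 1 := by simpa using h
      have hr : rest.length ≤ k := by omega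
      have hr1 : (c1 :: rest).length ≤ k := by simp; omega
      rw [pvGoA.eq_def]
      dsimp only
      by_cases hc : c0 = 'c'
      · subst hc
        by_cases h1 : c1 = '='
        · subst h1
          rw [pvScanB_tok2 'c' '=' rest n (Or.inl rfl), ← ih rest (n+1) hr]
          norm_num
        · by_cases h2 : c1 = '-'
          · subst h2
            rw [pvScanB_tok2 'c' '-' rest n (Or.inr (Or.inl rfl)), ← ih rest (n+1) hr]
            norm_num
          · rw [pvScanB_c_other c1 rest n h1 h2, ← ih (c1 :: rest) (n+1) hr1]
            simp [h1, h2]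
      · by_cases hd : c0 = 'd'
        · subst hd
          match rest with
          | [] =>
            by_cases h1 : c1 = '-'
            · subst h1
              rw [pvScanB_tok2 'd' '-' [] n (Or.inr (Or.inr (Or.inl rfl))), ← ih [] (n+1) (by simp)]
              simp [hc]
            · by_cases hz : c1 = 'z'
              · subst hz
                rw [pvScanB_dz_nil, ← ih ['z'] (n+1) (by simp at hlen ⊢; omega)]
                simp [hc]
              · rw [pvScanB_d_other c1 [] n h1 hz, ← ih [c1] (n+1) (by simp at hlen ⊢; omega)]
                simp [hc, h1]
          | c2 :: rest2 =>
            by_cases hzz : c1 = 'z' ∧ c2 = '='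
            · obtain ⟨rfl, rfl⟩ := hzz
              rw [pvScanB_tok3 rest2 n, ← ih rest2 (n+1) (by simp at hlen ⊢; omega)]
              simp [hc]
            · by_cases h1 : c1 = '-'
              · subst h1
                rw [pvScanB_tok2 'd' '-' (c2 :: rest2) n (Or.inr (Or.inr (Or.inl rfl))),
                  ← ih (c2 :: rest2) (n+1) hr]
                simp [hc]
              · by_cases hz : c1 = 'z'
                · subst hz
                  have hc2 : ¬ c2 = '=' := fun hh => hzz ⟨rfl, hh⟩
                  rw [pvScanB_dz_no c2 rest2 n hc2, ← ih ('z' :: c2 :: rest2) (n+1) hr1]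
                  simp [hc, hc2, h1]
                · rw [pvScanB_d_other c1 (c2 :: rest2) n h1 hz,
                    ← ih (c1 :: c2 :: rest2) (n+1) hr1]
                  simp [hc, hzz, h1]
        · by_cases hl : c0 = 'l'
          · subst hl
            by_cases h1 : c1 = 'j'
            · subst h1
              rw [pvScanB_tok2 'l' 'j' rest n (Or.inr (Or.inr (Or.inr (Or.inl rfl)))),
                ← ih rest (n+1) hr]
              simp [hc, hd]
            · rw [pvScanB_l_other c1 rest n h1, ← ih (c1 :: rest) (n+1) hr1]
              simp [hc, hd, h1]
          · by_cases hn : c0 = 'n'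
            · subst hn
              by_cases h1 : c1 = 'j'
              · subst h1
                rw [pvScanB_tok2 'n' 'j' rest n (Or.inr (Or.inr (Or.inr (Or.inr (Or.inl rfl))))),
                  ← ih rest (n+1) hr]
                simp [hc, hd, hl]
              · rw [pvScanB_n_other c1 rest n h1, ← ih (c1 :: rest) (n+1) hr1]
                simp [hc, hd, hl, h1]
            · by_cases hs : c0 = 's'
              · subst hs
                by_cases h1 : c1 = '='
                · subst h1
                  rw [pvScanB_tok2 's' '=' rest n
                      (Or.inr (Or.inr (Or.inr (Or.inr (Or.inr (Or.inl rfl)))))),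
                    ← ih rest (n+1) hr]
                  simp [hc, hd, hl, hn]
                · rw [pvScanB_s_other c1 rest n h1, ← ih (c1 :: rest) (n+1) hr1]
                  simp [hc, hd, hl, hn, h1]
              · by_cases hz : c0 = 'z'
                · subst hz
                  by_cases h1 : c1 = '='
                  · subst h1
                    rw [pvScanB_tok2 'z' '=' rest n
                        (Or.inr (Or.inr (Or.inr (Or.inr (Or.inr (Or.inr rfl)))))),
                      ← ih rest (n+1) hr]
                    simp [hc, hd, hl, hn, hs]
                  · rw [pvScanB_z_other c1 rest n h1, ← ih (c1 :: rest) (n+1) hr1]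
                    simp [hc, hd, hl, hn, hs, h1]
                · rw [pvScanB_other c0 c1 rest n hc hd hl hn hs hz,
                    ← ih (c1 :: rest) (n+1) hr1]
                  simp [hc, hd, hl, hn, hs, hz]

theorem word_iterator_spec : Claim_equal_word_iterator := by
  intro word length _
  unfold Spec_word_iterator word_iterator word_iterator_alt
  exact pv_go_eq word.toList.length word.toList length le_rfl
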